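-- pv_equiv track=rewrite | github.com/Devjunku/TIL | programmers/Level2/쿼드압축 후 개수 세기(Yet).py | d_mat
-- ===== SOURCE A (Python) =====
-- def d_mat(arr):
--
--     N = len(arr)//2
--
--     d_arr = []
--
--     for i in range(N):
--         de_arr = []
--         for j in range(N):
--             de_arr.append(arr[i][j])
--         d_arr.append(de_arr)
--
--     for i in range(N):
--         de_arr = []
--         for j in range(N, len(arr)):
--             de_arr.append(arr[i][j])
--         d_arr.append(de_arr)
--
--     for i in range(N, len(arr)):
--         de_arr = []
--         for j in range(N):
--             de_arr.append(arr[i][j])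
--         d_arr.append(de_arr)
--
--     for i in range(N, len(arr)):
--         de_arr = []
--         for j in range(N, len(arr)):
--             de_arr.append(arr[i][j])
--         d_arr.append(de_arr)
--
--     return d_arr
-- ===== SOURCE B (Python) =====
-- def d_mat(arr):
--     L = len(arr)
--     N = L // 2
--     top_left, top_right, bottom_left, bottom_right = [], [], [], []
--     for i, row in enumerate(arr):
--         left = [row[j] for j in range(N)]
--         right = [row[j] for j in range(N, L)]
--         if i < N:
--             top_left.append(left)
--             top_right.append(right)
--         else:
--             bottom_left.append(left)
--             bottom_right.append(right)
--     return top_left + top_right + bottom_left + bottom_right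
-- ===== Notes on version B (the rewrite author's own statement) =====
-- stated objective: simpler
-- what changed: One single pass over the rows with slicing and four accumulators replaces A's four separate index-range rescans with element-by-element inner loops.
import Mathlib
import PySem

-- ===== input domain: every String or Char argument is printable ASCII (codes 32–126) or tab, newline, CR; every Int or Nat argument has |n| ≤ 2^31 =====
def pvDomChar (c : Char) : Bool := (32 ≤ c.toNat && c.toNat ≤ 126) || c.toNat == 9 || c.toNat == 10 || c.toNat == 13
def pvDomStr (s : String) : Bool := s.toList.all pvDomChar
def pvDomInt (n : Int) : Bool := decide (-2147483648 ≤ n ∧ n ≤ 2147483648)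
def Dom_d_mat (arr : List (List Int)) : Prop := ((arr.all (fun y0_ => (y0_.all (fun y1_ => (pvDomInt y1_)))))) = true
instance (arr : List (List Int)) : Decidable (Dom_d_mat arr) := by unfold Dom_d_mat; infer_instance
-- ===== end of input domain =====

-- B is a single pass over the rows with slicing and four accumulators instead of A's four
-- separate index-range rescans (equivalence on the return value; neither mutates its argument).

-- ===== PORT A =====
def d_mat (arr : List (List Int)) : List (List Int) :=
  let L : Int := arr.length
  let N : Int := PySem.Int.floordiv L 2
  let d1 := (PySem.List.pyRange 0 N 1).foldl (fun d i =>
      d ++ [(PySem.List.pyRange 0 N 1).foldl (fun de j =>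
        de ++ [PySem.List.pyGetD (PySem.List.pyGetD arr i []) j 0]) []]) []
  let d2 := (PySem.List.pyRange 0 N 1).foldl (fun d i =>
      d ++ [(PySem.List.pyRange N L 1).foldl (fun de j =>
        de ++ [PySem.List.pyGetD (PySem.List.pyGetD arr i []) j 0]) []]) d1
  let d3 := (PySem.List.pyRange N L 1).foldl (fun d i =>
      d ++ [(PySem.List.pyRange 0 N 1).foldl (fun de j =>
        de ++ [PySem.List.pyGetD (PySem.List.pyGetD arr i []) j 0]) []]) d2
  let d4 := (PySem.List.pyRange N L 1).foldl (fun d i =>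
      d ++ [(PySem.List.pyRange N L 1).foldl (fun de j =>
        de ++ [PySem.List.pyGetD (PySem.List.pyGetD arr i []) j 0]) []]) d3
  d4

-- ===== PORT B =====
def d_mat_alt (arr : List (List Int)) : List (List Int) :=
  let L : Int := arr.length
  let N : Int := PySem.Int.floordiv L 2
  let st := (PySem.List.enumerate arr 0).foldl
      (fun (st : List (List Int) × List (List Int) × List (List Int) × List (List Int)) p =>
        let left := (PySem.List.pyRange 0 N 1).map (fun j => PySem.List.pyGetD p.2 j 0)
        let right := (PySem.List.pyRange N L 1).map (fun j => PySem.List.pyGetD p.2 j 0)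
        if p.1 < N then (st.1 ++ [left], st.2.1 ++ [right], st.2.2.1, st.2.2.2)
        else (st.1, st.2.1, st.2.2.1 ++ [left], st.2.2.2 ++ [right]))
      ([], [], [], [])
  st.1 ++ st.2.1 ++ st.2.2.1 ++ st.2.2.2

-- ===== PRECONDITION & SPEC =====
-- A indexes every row at columns 0..len(arr)-1, so it raises IndexError unless each row has
-- at least len(arr) elements; Pre_ admits exactly the inputs on which A returns.
def Pre_d_mat (arr : List (List Int)) : Prop :=
  (arr.all (fun row => arr.length ≤ row.length)) = true
instance (arr : List (List Int)) : Decidable (Pre_d_mat arr) := by unfold Pre_d_mat; infer_instance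
def pvWitness_d_mat : List (List Int) := [[1, 2], [3, 4]]

def Spec_d_mat (arr : List (List Int)) (out : List (List Int)) : Prop := out = d_mat_alt arr
instance (arr : List (List Int)) (out : List (List Int)) : Decidable (Spec_d_mat arr out) := by unfold Spec_d_mat; infer_instance

-- ===== CLAIM (what is proved, stated in full; the proofs are below) =====
def Claim_equal_d_mat : Prop := ∀ (arr : List (List Int)), Dom_d_mat arr → Pre_d_mat arr → Spec_d_mat arr (d_mat arr)

-- ===== LEMMAS AND PROOFS =====

def canon (arr : List (List Int)) : List (List Int) :=
  let n := arr.length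
  let m := n / 2
  (arr.take m).map (fun r => r.take m)
    ++ (arr.take m).map (fun r => (r.drop m).take (n - m))
    ++ (arr.drop m).map (fun r => r.take m)
    ++ (arr.drop m).map (fun r => (r.drop m).take (n - m))

theorem map_pyRange_getD {α β : Type} (xs : List α) (d : α) (f : α → β) (a b : Nat)
    (hb : b ≤ xs.length) :
    (PySem.List.pyRange (a : Int) (b : Int) 1).map (fun i => f (PySem.List.pyGetD xs i d))
      = ((xs.drop a).take (b - a)).map f := by
  apply List.ext_getElem
  · simp [PySem.List.length_pyRange_one]
    omega
  · intro k h1 h2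
    simp only [List.getElem_map, PySem.List.getElem_pyRange_one]
    have hk : k < (((b:Int) - (a:Int)).toNat) := by
      simpa [PySem.List.length_pyRange_one] using h1
    have hak : a + k < xs.length := by omega
    have : (a : Int) + (k : Int) = ((a + k : Nat) : Int) := by push_cast; ring
    rw [this, PySem.List.pyGetD_natCast]
    congr 1
    rw [List.getElem_take, List.getElem_drop]
    rw [List.getD_eq_getElem _ _ hak]

theorem map_pyRange_getD0 {α β : Type} (xs : List α) (d : α) (f : α → β) (b : Nat)
    (hb : b ≤ xs.length) :
    (PySem.List.pyRange 0 (b : Int) 1).map (fun i => f (PySem.List.pyGetD xs i d))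
      = (xs.take b).map f := by
  have := map_pyRange_getD xs d f 0 b hb
  simpa using this

theorem d_mat_eq_canon (arr : List (List Int))
    (hrow : ∀ r ∈ arr, arr.length ≤ r.length) : d_mat arr = canon arr := by
  have hN : PySem.Int.floordiv ((arr.length : Nat) : Int) 2 = ((arr.length / 2 : Nat) : Int) := by
    exact_mod_cast PySem.Int.floordiv_natCast arr.length 2
  have hmn : arr.length / 2 ≤ arr.length := Nat.div_le_self _ _
  have hL : ∀ r ∈ arr, (PySem.List.pyRange 0 ((arr.length / 2 : Nat) : Int) 1).map
      (fun j => PySem.List.pyGetD r j 0) = r.take (arr.length / 2) := by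
    intro r hr
    have h := hrow r hr
    exact (map_pyRange_getD0 r 0 id (arr.length / 2) (by omega)).trans (List.map_id _)
  have hR : ∀ r ∈ arr, (PySem.List.pyRange ((arr.length / 2 : Nat) : Int) ((arr.length : Nat) : Int) 1).map
      (fun j => PySem.List.pyGetD r j 0) = (r.drop (arr.length / 2)).take (arr.length - arr.length / 2) := by
    intro r hr
    have h := hrow r hr
    exact (map_pyRange_getD r 0 id (arr.length / 2) arr.length (by omega)).trans (List.map_id _)
  have h1 : (PySem.List.pyRange 0 ((arr.length / 2 : Nat) : Int) 1).map
      (fun x => (PySem.List.pyRange 0 ((arr.length / 2 : Nat) : Int) 1).map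
        (fun j => PySem.List.pyGetD (PySem.List.pyGetD arr x []) j 0))
      = (arr.take (arr.length / 2)).map (fun r => r.take (arr.length / 2)) := by
    rw [map_pyRange_getD0 arr []
      (fun r => (PySem.List.pyRange 0 ((arr.length / 2 : Nat) : Int) 1).map
        (fun j => PySem.List.pyGetD r j 0)) (arr.length / 2) hmn]
    exact List.map_congr_left (fun r hr => hL r (List.mem_of_mem_take hr))
  have h2 : (PySem.List.pyRange 0 ((arr.length / 2 : Nat) : Int) 1).map
      (fun x => (PySem.List.pyRange ((arr.length / 2 : Nat) : Int) ((arr.length : Nat) : Int) 1).map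
        (fun j => PySem.List.pyGetD (PySem.List.pyGetD arr x []) j 0))
      = (arr.take (arr.length / 2)).map (fun r => (r.drop (arr.length / 2)).take (arr.length - arr.length / 2)) := by
    rw [map_pyRange_getD0 arr []
      (fun r => (PySem.List.pyRange ((arr.length / 2 : Nat) : Int) ((arr.length : Nat) : Int) 1).map
        (fun j => PySem.List.pyGetD r j 0)) (arr.length / 2) hmn]
    exact List.map_congr_left (fun r hr => hR r (List.mem_of_mem_take hr))
  have hdrop : (arr.drop (arr.length / 2)).take (arr.length - arr.length / 2) = arr.drop (arr.length / 2) :=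
    List.take_of_length_le (le_of_eq (by simp))
  have h3 : (PySem.List.pyRange ((arr.length / 2 : Nat) : Int) ((arr.length : Nat) : Int) 1).map
      (fun x => (PySem.List.pyRange 0 ((arr.length / 2 : Nat) : Int) 1).map
        (fun j => PySem.List.pyGetD (PySem.List.pyGetD arr x []) j 0))
      = (arr.drop (arr.length / 2)).map (fun r => r.take (arr.length / 2)) := by
    rw [map_pyRange_getD arr []
      (fun r => (PySem.List.pyRange 0 ((arr.length / 2 : Nat) : Int) 1).map
        (fun j => PySem.List.pyGetD r j 0)) (arr.length / 2) arr.length le_rfl, hdrop]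
    exact List.map_congr_left (fun r hr => hL r (List.mem_of_mem_drop hr))
  have h4 : (PySem.List.pyRange ((arr.length / 2 : Nat) : Int) ((arr.length : Nat) : Int) 1).map
      (fun x => (PySem.List.pyRange ((arr.length / 2 : Nat) : Int) ((arr.length : Nat) : Int) 1).map
        (fun j => PySem.List.pyGetD (PySem.List.pyGetD arr x []) j 0))
      = (arr.drop (arr.length / 2)).map (fun r => (r.drop (arr.length / 2)).take (arr.length - arr.length / 2)) := by
    rw [map_pyRange_getD arr []
      (fun r => (PySem.List.pyRange ((arr.length / 2 : Nat) : Int) ((arr.length : Nat) : Int) 1).map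
        (fun j => PySem.List.pyGetD r j 0)) (arr.length / 2) arr.length le_rfl, hdrop]
    exact List.map_congr_left (fun r hr => hR r (List.mem_of_mem_drop hr))
  unfold d_mat canon
  simp only [PySem.List.foldl_append_singleton_eq_map, hN, List.nil_append]
  rw [h1, h2, h3, h4]

theorem foldB_lt (N : Int) (fL fR : List Int → List Int) (xs : List (List Int)) (s : Int)
    (hs : 0 ≤ s) (h : s + xs.length ≤ N) (tl tr bl br : List (List Int)) :
    (PySem.List.enumerate xs s).foldl
      (fun (st : List (List Int) × List (List Int) × List (List Int) × List (List Int)) p =>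
        if p.1 < N then (st.1 ++ [fL p.2], st.2.1 ++ [fR p.2], st.2.2.1, st.2.2.2)
        else (st.1, st.2.1, st.2.2.1 ++ [fL p.2], st.2.2.2 ++ [fR p.2])) (tl, tr, bl, br)
    = (tl ++ xs.map fL, tr ++ xs.map fR, bl, br) := by
  induction xs generalizing s tl tr with
  | nil => simp [PySem.List.enumerate_nil]
  | cons x xs ih =>
    rw [PySem.List.enumerate_cons]
    simp only [List.foldl_cons, List.length_cons] at *
    have hlt : s < N := by
      have : (0:Int) ≤ xs.length := by positivity
      push_cast at h; omega
    rw [if_pos hlt]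
    rw [ih (s+1) (by omega) (by push_cast at h ⊢; omega)]
    simp

theorem foldB_ge (N : Int) (fL fR : List Int → List Int) (xs : List (List Int)) (s : Int)
    (h : N ≤ s) (tl tr bl br : List (List Int)) :
    (PySem.List.enumerate xs s).foldl
      (fun (st : List (List Int) × List (List Int) × List (List Int) × List (List Int)) p =>
        if p.1 < N then (st.1 ++ [fL p.2], st.2.1 ++ [fR p.2], st.2.2.1, st.2.2.2)
        else (st.1, st.2.1, st.2.2.1 ++ [fL p.2], st.2.2.2 ++ [fR p.2])) (tl, tr, bl, br)
    = (tl, tr, bl ++ xs.map fL, br ++ xs.map fR) := by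
  induction xs generalizing s bl br with
  | nil => simp [PySem.List.enumerate_nil]
  | cons x xs ih =>
    rw [PySem.List.enumerate_cons]
    simp only [List.foldl_cons]
    rw [if_neg (by omega)]
    rw [ih (s+1) (by omega)]
    simp

theorem d_mat_alt_eq_canon (arr : List (List Int))
    (hrow : ∀ r ∈ arr, arr.length ≤ r.length) : d_mat_alt arr = canon arr := by
  have hN : PySem.Int.floordiv ((arr.length : Nat) : Int) 2 = ((arr.length / 2 : Nat) : Int) := by
    exact_mod_cast PySem.Int.floordiv_natCast arr.length 2
  have hmn : arr.length / 2 ≤ arr.length := Nat.div_le_self _ _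
  have hL : ∀ r ∈ arr, (PySem.List.pyRange 0 ((arr.length / 2 : Nat) : Int) 1).map
      (fun j => PySem.List.pyGetD r j 0) = r.take (arr.length / 2) := by
    intro r hr
    have h := hrow r hr
    exact (map_pyRange_getD0 r 0 id (arr.length / 2) (by omega)).trans (List.map_id _)
  have hR : ∀ r ∈ arr, (PySem.List.pyRange ((arr.length / 2 : Nat) : Int) ((arr.length : Nat) : Int) 1).map
      (fun j => PySem.List.pyGetD r j 0) = (r.drop (arr.length / 2)).take (arr.length - arr.length / 2) := by
    intro r hr
    have h := hrow r hr
    exact (map_pyRange_getD r 0 id (arr.length / 2) arr.length (by omega)).trans (List.map_id _)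
  have he : PySem.List.enumerate arr 0
      = PySem.List.enumerate (arr.take (arr.length / 2)) 0
        ++ PySem.List.enumerate (arr.drop (arr.length / 2)) (0 + (arr.take (arr.length / 2)).length) := by
    conv_lhs => rw [← List.take_append_drop (arr.length / 2) arr]
    rw [PySem.List.enumerate_append]
  have hlen : (arr.take (arr.length / 2)).length = arr.length / 2 := by simp [hmn]
  unfold d_mat_alt canon
  simp only [hN, he, List.foldl_append, hlen]
  rw [foldB_lt ((arr.length / 2 : Nat) : Int)
    (fun r => (PySem.List.pyRange 0 ((arr.length / 2 : Nat) : Int) 1).map (fun j => PySem.List.pyGetD r j 0))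
    (fun r => (PySem.List.pyRange ((arr.length / 2 : Nat) : Int) ((arr.length : Nat) : Int) 1).map (fun j => PySem.List.pyGetD r j 0))
    _ 0 le_rfl (by simp [hlen])]
  rw [foldB_ge ((arr.length / 2 : Nat) : Int)
    (fun r => (PySem.List.pyRange 0 ((arr.length / 2 : Nat) : Int) 1).map (fun j => PySem.List.pyGetD r j 0))
    (fun r => (PySem.List.pyRange ((arr.length / 2 : Nat) : Int) ((arr.length : Nat) : Int) 1).map (fun j => PySem.List.pyGetD r j 0))
    _ _ (by simp)]
  simp only [List.nil_append]
  congr 1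
  · congr 1
    · congr 1
      · exact List.map_congr_left (fun r hr => hL r (List.mem_of_mem_take hr))
      · exact List.map_congr_left (fun r hr => hR r (List.mem_of_mem_take hr))
    · exact List.map_congr_left (fun r hr => hL r (List.mem_of_mem_drop hr))
  · exact List.map_congr_left (fun r hr => hR r (List.mem_of_mem_drop hr))

-- ===== VERDICT (by name: the statement is the Claim_ definition above) =====
theorem d_mat_spec : Claim_equal_d_mat := by
  intro arr _ hpre
  have hrow : ∀ r ∈ arr, arr.length ≤ r.length := by
    simpa [Pre_d_mat, List.all_eq_true] using hpre
  show d_mat arr = d_mat_alt arr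
  rw [d_mat_eq_canon arr hrow, d_mat_alt_eq_canon arr hrow]
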